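-- pv_equiv track=rewrite | github.com/Verkeerd/web_shop_database_transfer | mastermind/general_functions.py | calc_black_pins
-- ===== SOURCE A (Python) =====
-- def calc_black_pins(guess, code):
--     """
--     Takes a secret code (list) [int] and a guess (list) [int] as input.
--     Calculates the amount of pegs that are the correct color on the correct spot and deletes these pegs from both lists.
--     Returns the amount of pegs that were found (int).
--     """
--     amount = 0
--     # cycles through the two lists in reversed order
--     for i in range((len(guess) - 1), -1, -1):
--         if guess[i] == code[i]:
--             amount += 1
--             del guess[i]
--             del code[i]
--
--     return amount
-- ===== SOURCE B (Python) =====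
-- def calc_black_pins(guess, code):
--     """
--     Forward single pass: count exact-position matches, collect the non-matching
--     pegs, then rebuild both lists in place (keeping code's untouched tail).
--     Returns the amount of matching pegs (int).
--     """
--     n = len(guess)
--     amount = 0
--     kept_g = []
--     kept_c = []
--     for i in range(n):
--         if guess[i] == code[i]:
--             amount += 1
--         else:
--             kept_g.append(guess[i])
--             kept_c.append(code[i])
--     guess[:] = kept_g
--     code[:] = kept_c + code[n:]
--     return amount
-- ===== Notes on version B (the rewrite author's own statement) =====
-- stated objective: simpler
-- what changed: Replaces the reverse loop with index-shifting in-place deletions by a forward single pass that counts matches and rebuilds both lists from collected non-matching pegs (re-appending code's untouched tail).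
import Mathlib
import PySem

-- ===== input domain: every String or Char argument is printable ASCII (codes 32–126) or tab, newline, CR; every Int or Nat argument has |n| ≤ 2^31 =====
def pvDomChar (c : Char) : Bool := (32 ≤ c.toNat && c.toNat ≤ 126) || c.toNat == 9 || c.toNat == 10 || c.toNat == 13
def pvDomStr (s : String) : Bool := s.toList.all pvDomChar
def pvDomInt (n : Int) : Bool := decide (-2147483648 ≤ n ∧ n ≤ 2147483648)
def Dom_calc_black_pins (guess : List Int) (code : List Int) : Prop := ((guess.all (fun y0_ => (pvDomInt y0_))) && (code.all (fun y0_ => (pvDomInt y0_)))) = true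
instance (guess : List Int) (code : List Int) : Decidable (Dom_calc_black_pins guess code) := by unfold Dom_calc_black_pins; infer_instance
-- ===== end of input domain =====

-- B counts exact-position matches in one forward pass instead of A's reverse loop with
-- in-place deletions; both Pythons also mutate guess/code identically — the theorems here
-- are about the RETURN value only.

-- ===== PORT A =====
-- the for-loop 'for i in range(len(guess)-1, -1, -1)' as a countdown recursion over i;
-- the out-of-range case (Python IndexError) is excluded by Pre_ and never reached there
def loopA : Nat → Int → List Int → List Int → Int
  | 0, amount, _, _ => amount
  | (i+1), amount, g, c =>
      match PySem.List.pyGet? g (i : Int), PySem.List.pyGet? c (i : Int) with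
      | some a, some b =>
          if a == b then loopA i (amount + 1) (g.eraseIdx i) (c.eraseIdx i)
          else loopA i amount g c
      | _, _ => amount

def calc_black_pins (guess : List Int) (code : List Int) : Int :=
  loopA guess.length 0 guess code

-- ===== PORT B =====
-- forward pass over range(len(guess)); state = (amount, kept_g, kept_c); returns amount
def calc_black_pins_alt (guess : List Int) (code : List Int) : Int :=
  let st := (List.range guess.length).foldl
    (fun (st : Int × List Int × List Int) (i : Nat) =>
      match PySem.List.pyGet? guess (i : Int), PySem.List.pyGet? code (i : Int) with
      | some a, some b =>
          if a == b then (st.1 + 1, st.2.1, st.2.2)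
          else (st.1, st.2.1 ++ [a], st.2.2 ++ [b])
      | _, _ => st)
    (0, [], [])
  st.1

-- ===== PRECONDITION & SPEC =====
-- A raises IndexError (on code[i]) exactly when code is shorter than guess
def Pre_calc_black_pins (guess : List Int) (code : List Int) : Prop :=
  guess.length ≤ code.length
instance (guess : List Int) (code : List Int) : Decidable (Pre_calc_black_pins guess code) := by
  unfold Pre_calc_black_pins; infer_instance

def pvWitness_calc_black_pins : List Int × List Int := ([1, 2, 3], [1, 3, 3])

def Spec_calc_black_pins (guess : List Int) (code : List Int) (out : Int) : Prop :=
  out = calc_black_pins_alt guess code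
instance (guess : List Int) (code : List Int) (out : Int) : Decidable (Spec_calc_black_pins guess code out) := by
  unfold Spec_calc_black_pins; infer_instance

-- ===== CLAIM (what is proved, stated in full; the proofs are below) =====
def Claim_equal_calc_black_pins : Prop := ∀ (guess : List Int) (code : List Int), Dom_calc_black_pins guess code → Pre_calc_black_pins guess code → Spec_calc_black_pins guess code (calc_black_pins guess code)

-- ===== LEMMAS AND PROOFS =====

-- number of exact-position matches of two lists (truncating at the shorter)
def mc : List Int → List Int → Int
  | a :: g, b :: c => (if a == b then 1 else 0) + mc g c
  | _, _ => 0

theorem mc_append (xs ys : List Int) (x y : Int) (h : xs.length = ys.length) :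
    mc (xs ++ [x]) (ys ++ [y]) = mc xs ys + (if x == y then 1 else 0) := by
  induction xs generalizing ys with
  | nil => cases ys with
    | nil => simp [mc]
    | cons b c => simp at h
  | cons a g ih => cases ys with
    | nil => simp at h
    | cons b c =>
      simp at h
      simp [mc, ih c h]
      ring

theorem take_eraseIdx_self (l : List Int) (i : Nat) :
    (l.eraseIdx i).take i = l.take i := by
  induction l generalizing i with
  | nil => simp [List.eraseIdx]
  | cons a l ih =>
    cases i with
    | zero => simp
    | succ i => simp [List.eraseIdx, ih i]

theorem take_succ_concat (l : List Int) (i : Nat) (h : i < l.length) :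
    l.take (i + 1) = l.take i ++ [l[i]] := by
  rw [List.take_add_one]
  simp [List.getElem?_eq_getElem h]

theorem loopA_eq_mc (i : Nat) :
    ∀ (amount : Int) (g cs : List Int), i ≤ g.length → i ≤ cs.length →
      loopA i amount g cs = amount + mc (g.take i) (cs.take i) := by
  induction i with
  | zero => intro amount g cs _ _; simp [loopA, mc]
  | succ i ih =>
    intro amount g cs hg hc
    have hgi : i < g.length := by omega
    have hci : i < cs.length := by omega
    have hga : PySem.List.pyGet? g (i : Int) = some g[i] := by
      simp [List.getElem?_eq_getElem hgi]
    have hca : PySem.List.pyGet? cs (i : Int) = some cs[i] := by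
      simp [List.getElem?_eq_getElem hci]
    rw [loopA, hga, hca]
    rw [take_succ_concat g i hgi, take_succ_concat cs i hci,
        mc_append (g.take i) (cs.take i) g[i] cs[i] (by simp; omega)]
    by_cases hab : g[i] = cs[i]
    · simp only [hab, beq_self_eq_true, if_true]
      rw [ih (amount + 1) (g.eraseIdx i) (cs.eraseIdx i)
            (by rw [List.length_eraseIdx_of_lt hgi]; omega)
            (by rw [List.length_eraseIdx_of_lt hci]; omega)]
      rw [take_eraseIdx_self, take_eraseIdx_self]
      ring
    · have hb : (g[i] == cs[i]) = false := by simp [hab]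
      simp only [hb, Bool.false_eq_true, if_false,
        ih amount g cs (le_of_lt hgi) (le_of_lt hci)]
      ring

-- B's fold, first component only
theorem foldB_eq_mc (g cs : List Int) (n : Nat) (hg : n ≤ g.length) (hc : n ≤ cs.length) :
    ∀ (st : Int × List Int × List Int),
      (((List.range n).foldl
        (fun (st : Int × List Int × List Int) (i : Nat) =>
          match PySem.List.pyGet? g (i : Int), PySem.List.pyGet? cs (i : Int) with
          | some a, some b =>
              if a == b then (st.1 + 1, st.2.1, st.2.2)
              else (st.1, st.2.1 ++ [a], st.2.2 ++ [b])
          | _, _ => st)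
        st).1)
      = st.1 + mc (g.take n) (cs.take n) := by
  induction n with
  | zero => intro st; simp [mc]
  | succ n ih =>
    intro st
    have hgn : n < g.length := by omega
    have hcn : n < cs.length := by omega
    have hga : PySem.List.pyGet? g (n : Int) = some g[n] := by
      simp [List.getElem?_eq_getElem hgn]
    have hca : PySem.List.pyGet? cs (n : Int) = some cs[n] := by
      simp [List.getElem?_eq_getElem hcn]
    rw [List.range_succ, List.foldl_append]
    simp only [List.foldl_cons, List.foldl_nil, hga, hca]
    rw [take_succ_concat g n hgn, take_succ_concat cs n hcn,
        mc_append (g.take n) (cs.take n) g[n] cs[n] (by simp; omega)]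
    have hrec := ih (by omega) (by omega) st
    by_cases hab : g[n] = cs[n]
    · simp only [hab, beq_self_eq_true, if_true, hrec]
      ring
    · have hb : (g[n] == cs[n]) = false := by simp [hab]
      simp only [hb, Bool.false_eq_true, if_false, hrec]
      ring

-- ===== VERDICT (by name: the statement is the Claim_ definition above) =====
theorem calc_black_pins_spec : Claim_equal_calc_black_pins := by
  intro guess code _ hpre
  unfold Spec_calc_black_pins calc_black_pins calc_black_pins_alt
  rw [loopA_eq_mc guess.length 0 guess code le_rfl hpre]
  rw [foldB_eq_mc guess code guess.length le_rfl hpre (0, [], [])]
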